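-- pv_equiv track=rewrite | github.com/MaxSchmitz/online_translater_practice | Problems/Stable selection sort/farts.py | farts
-- ===== SOURCE A (Python) =====
-- def farts(array, left, right, value):
--     if left >= right:
--         return 0
--     elif left == right - 1:
--         if array[left] == value:
--             return 1
--         else:
--             return 0
--     else:
--         middle = (left + right) // 2
--         return farts(array, left, middle, value) + farts(array, middle, right, value)
-- ===== SOURCE B (Python) =====
-- def farts(array, left, right, value):
--     count = 0
--     for i in range(left, right):
--         if array[i] == value:
--             count += 1
--     return count
-- ===== Notes on version B (the rewrite author's own statement) =====
-- stated objective: simpler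
-- what changed: Replaced the recursive middle-splitting divide-and-conquer with a single iterative pass over range(left, right) that increments a counter on each match, indexing directly so negative-index behaviour is preserved.
import Mathlib
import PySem

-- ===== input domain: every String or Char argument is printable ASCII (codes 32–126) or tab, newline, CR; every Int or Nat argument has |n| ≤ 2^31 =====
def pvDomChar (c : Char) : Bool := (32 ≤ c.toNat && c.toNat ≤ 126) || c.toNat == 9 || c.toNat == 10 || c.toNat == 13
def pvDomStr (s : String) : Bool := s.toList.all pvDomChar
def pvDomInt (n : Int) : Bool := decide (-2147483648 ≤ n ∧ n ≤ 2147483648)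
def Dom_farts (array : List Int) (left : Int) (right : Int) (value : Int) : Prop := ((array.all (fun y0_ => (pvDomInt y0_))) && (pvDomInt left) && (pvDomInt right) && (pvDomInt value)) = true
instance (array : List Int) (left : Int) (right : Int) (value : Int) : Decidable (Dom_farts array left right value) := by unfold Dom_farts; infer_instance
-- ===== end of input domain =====

-- B replaces the recursive middle-splitting count with one iterative pass over range(left, right); objective: simpler.

-- ===== PORT A =====
def farts (array : List Int) (left : Int) (right : Int) (value : Int) : Int :=
  if left ≥ right then 0
  else if left = right - 1 then
    if PySem.List.pyGetD array left 0 = value then 1 else 0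
  else
    let middle := PySem.Int.floordiv (left + right) 2
    farts array left middle value + farts array middle right value
termination_by (right - left).toNat
decreasing_by
  all_goals
    rw [PySem.Int.floordiv_eq_ediv_of_pos (by omega)]
    omega

-- ===== PORT B =====
def farts_alt (array : List Int) (left : Int) (right : Int) (value : Int) : Int :=
  (PySem.List.pyRange left right 1).foldl
    (fun count i => if PySem.List.pyGetD array i 0 = value then count + 1 else count) 0

-- ===== PRECONDITION & SPEC =====
-- Pre_ excludes exactly the inputs where Python A raises IndexError: some index in
-- [left, right) is outside Python's valid (negative-wrapping) index range of the list.
def Pre_farts (array : List Int) (left : Int) (right : Int) (value : Int) : Prop :=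
  right ≤ left ∨ (-(array.length : Int) ≤ left ∧ right ≤ (array.length : Int))
instance (array : List Int) (left : Int) (right : Int) (value : Int) : Decidable (Pre_farts array left right value) := by unfold Pre_farts; infer_instance
def pvWitness_farts : List Int × Int × Int × Int := ([1, 2, 1, 3], 0, 4, 1)

def Spec_farts (array : List Int) (left : Int) (right : Int) (value : Int) (out : Int) : Prop := out = farts_alt array left right value
instance (array : List Int) (left : Int) (right : Int) (value : Int) (out : Int) : Decidable (Spec_farts array left right value out) := by unfold Spec_farts; infer_instance

-- ===== CLAIM (what is proved, stated in full; the proofs are below) =====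
def Claim_equal_farts : Prop := ∀ (array : List Int) (left : Int) (right : Int) (value : Int), Dom_farts array left right value → Pre_farts array left right value → Spec_farts array left right value (farts array left right value)

-- ===== LEMMAS AND PROOFS =====

-- B's fold equals the 0/1 sum over the range.
lemma farts_alt_eq_sum (array : List Int) (left right value : Int) :
    farts_alt array left right value =
      ((PySem.List.pyRange left right 1).map
        (fun i => if PySem.List.pyGetD array i 0 = value then (1 : Int) else 0)).sum := by
  unfold farts_alt
  have h : (fun (count : Int) (i : Int) =>
      if PySem.List.pyGetD array i 0 = value then count + 1 else count)
      = fun count i => count + (if PySem.List.pyGetD array i 0 = value then (1 : Int) else 0) := by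
    funext c i; split <;> simp
  rw [h, PySem.List.foldl_add]
  simp

-- A's recursion also computes that sum (strong induction on the interval length).
lemma farts_eq_sum (array : List Int) (value : Int) :
    ∀ (n : Nat) (left right : Int), (right - left).toNat ≤ n →
      farts array left right value =
        ((PySem.List.pyRange left right 1).map
          (fun i => if PySem.List.pyGetD array i 0 = value then (1 : Int) else 0)).sum := by
  intro n
  induction n with
  | zero =>
    intro l r h
    have hlr : r ≤ l := by omega
    rw [farts, PySem.List.pyRange_one_eq_nil hlr]
    simp [hlr]
  | succ n ih =>
    intro l r h
    rw [farts]
    by_cases h1 : l ≥ r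
    · rw [PySem.List.pyRange_one_eq_nil h1]; simp [h1]
    · by_cases h2 : l = r - 1
      · have : r = l + 1 := by omega
        subst this
        rw [PySem.List.pyRange_one_singleton]
        simp [h1]
      · simp only [h1, h2, if_false]
        have hmid := PySem.Int.floordiv_two_mid_bounds (lo := l) (hi := r) (by omega)
        set m := PySem.Int.floordiv (l + r) 2 with hm
        have hm2 : l < m ∧ m < r := by
          rw [hm, PySem.Int.floordiv_eq_ediv_of_pos (by omega)]
          constructor <;> omega
        rw [ih l m (by omega), ih m r (by omega),
          PySem.List.pyRange_one_append l m r (by omega) (by omega), List.map_append,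
          List.sum_append]

-- ===== VERDICT (by name: the statement is the Claim_ definition above) =====
theorem farts_spec : Claim_equal_farts := by
  intro array left right value _ _
  unfold Spec_farts
  rw [farts_alt_eq_sum, farts_eq_sum array value (right - left).toNat left right le_rfl]
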